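-- pv_equiv track=rewrite | github.com/tuur/STPS | lib/tree_intersections.py | tuple_subsumption
-- ===== SOURCE A (Python) =====
-- def subtuple(r,t): # (1,2,3) is a subtuple of (1,2,3,4,5..), (1,2,4) is not
--     if len(r)>len(t):
--         return False
--     else:
--         return t[:len(r)]==r
--
-- def tuple_subsumption(s1,s2):
--     for t1 in s1:
--         go = False
--         for t2 in s2:
--             if subtuple(t1,t2):
--                 go=True
--                 break
--         if go==False:
--             return False
--     return True
-- ===== SOURCE B (Python) =====
-- def tuple_subsumption(s1, s2):
--     prefixes = set()
--     for t2 in s2: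
--         for i in range(len(t2) + 1):
--             prefixes.add(t2[:i])
--     return all(t1 in prefixes for t1 in s1)
-- ===== Notes on version B (the rewrite author's own statement) =====
-- stated objective: alternative
-- what changed: Instead of scanning all of s2 for every t1 with a prefix comparison and an early break, B builds a set of all prefixes of s2's tuples once and answers each t1 by one set lookup.
import Mathlib
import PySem

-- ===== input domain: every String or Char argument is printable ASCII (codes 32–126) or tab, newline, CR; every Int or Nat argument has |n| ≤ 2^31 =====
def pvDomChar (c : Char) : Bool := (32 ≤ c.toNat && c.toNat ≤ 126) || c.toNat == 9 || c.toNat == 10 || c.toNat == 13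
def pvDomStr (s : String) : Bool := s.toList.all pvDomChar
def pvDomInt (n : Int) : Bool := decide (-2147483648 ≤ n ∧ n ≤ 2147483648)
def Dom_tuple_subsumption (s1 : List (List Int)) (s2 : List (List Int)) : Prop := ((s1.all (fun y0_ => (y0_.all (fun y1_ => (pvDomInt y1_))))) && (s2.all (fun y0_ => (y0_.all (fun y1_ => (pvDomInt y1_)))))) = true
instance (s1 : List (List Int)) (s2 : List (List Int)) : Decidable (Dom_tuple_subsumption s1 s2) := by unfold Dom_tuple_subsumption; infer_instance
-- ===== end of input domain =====

-- B replaces A's nested scan (each t1 compared against every t2) by a set of all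
-- prefixes of s2's tuples built once, then one membership lookup per t1 (alternative algorithm).

-- ===== PORT A =====
-- subtuple(r,t)
def pvSubtuple (r t : List Int) : Bool :=
  if r.length > t.length then false
  else PySem.List.slice t none (some (r.length : Int)) == r

-- inner 'for t2 in s2' loop with break: computes the final value of 'go'
def pvInnerA (t1 : List Int) : List (List Int) → Bool
  | [] => false
  | t2 :: rest => if pvSubtuple t1 t2 then true else pvInnerA t1 rest

def tuple_subsumption (s1 : List (List Int)) (s2 : List (List Int)) : Bool :=
  match s1 with
  | [] => true
  | t1 :: rest =>
    let go := pvInnerA t1 s2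
    if go == false then false else tuple_subsumption rest s2

-- ===== PORT B =====
-- prefixes = set(); for t2 in s2: for i in range(len(t2)+1): prefixes.add(t2[:i])
def pvPrefixSet (s2 : List (List Int)) : PySem.Set (List Int) :=
  s2.foldl
    (fun acc t2 =>
      (List.range (t2.length + 1)).foldl (fun acc i => PySem.Set.add acc (t2.take i)) acc)
    PySem.Set.empty

def tuple_subsumption_alt (s1 : List (List Int)) (s2 : List (List Int)) : Bool :=
  let prefixes := pvPrefixSet s2
  s1.all (fun t1 => PySem.Set.contains prefixes t1)

-- ===== PRECONDITION & SPEC =====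
def Spec_tuple_subsumption (s1 : List (List Int)) (s2 : List (List Int)) (out : Bool) : Prop := out = tuple_subsumption_alt s1 s2
instance (s1 : List (List Int)) (s2 : List (List Int)) (out : Bool) : Decidable (Spec_tuple_subsumption s1 s2 out) := by unfold Spec_tuple_subsumption; infer_instance

-- ===== CLAIM (what is proved, stated in full; the proofs are below) =====
def Claim_equal_tuple_subsumption : Prop := ∀ (s1 : List (List Int)) (s2 : List (List Int)), Dom_tuple_subsumption s1 s2 → Spec_tuple_subsumption s1 s2 (tuple_subsumption s1 s2)

-- ===== LEMMAS AND PROOFS =====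

-- subtuple r t is exactly "r is a prefix of t"
theorem pvSubtuple_iff (r t : List Int) : pvSubtuple r t = true ↔ r <+: t := by
  unfold pvSubtuple
  rw [PySem.List.slice_to_natCast]
  split_ifs with h
  · simp only [false_iff]
    intro hp
    exact absurd (List.IsPrefix.length_le hp) (by omega)
  · rw [beq_iff_eq, List.prefix_iff_eq_take]
    constructor
    · intro h'; exact h'.symm
    · intro h'; exact h'.symm

-- the inner loop of A finds a t2 with subtuple(t1,t2) iff there is one
theorem pvInnerA_iff (t1 : List Int) (s2 : List (List Int)) :
    pvInnerA t1 s2 = true ↔ ∃ t2 ∈ s2, t1 <+: t2 := by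
  induction s2 with
  | nil => simp [pvInnerA]
  | cons t2 rest ih =>
    simp only [pvInnerA]
    by_cases h : pvSubtuple t1 t2 = true
    · simp only [h, if_true, true_iff]
      exact ⟨t2, List.mem_cons_self, (pvSubtuple_iff t1 t2).1 h⟩
    · simp only [h]
      rw [if_neg (by simp [h]), ih]
      constructor
      · rintro ⟨u, hu, hp⟩; exact ⟨u, List.mem_cons_of_mem _ hu, hp⟩
      · rintro ⟨u, hu, hp⟩
        rcases List.mem_cons.1 hu with rfl | hu'
        · exact absurd ((pvSubtuple_iff t1 u).2 hp) h
        · exact ⟨u, hu', hp⟩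

-- membership after the inner range-fold
theorem mem_range_foldl (t2 : List Int) (acc : PySem.Set (List Int)) (x : List Int) (n : Nat) :
    x ∈ (List.range n).foldl (fun acc i => PySem.Set.add acc (t2.take i)) acc ↔
      x ∈ acc ∨ ∃ i < n, x = t2.take i := by
  induction n generalizing acc with
  | zero => simp
  | succ n ih =>
    rw [List.range_succ, List.foldl_append]
    simp only [List.foldl_cons, List.foldl_nil, ih, PySem.Set.mem_add]
    constructor
    · rintro ((h | ⟨i, hi, rfl⟩) | rfl)
      · exact Or.inl h
      · exact Or.inr ⟨i, by omega, rfl⟩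
      · exact Or.inr ⟨n, by omega, rfl⟩
    · rintro (h | ⟨i, hi, rfl⟩)
      · exact Or.inl (Or.inl h)
      · by_cases hin : i = n
        · subst hin; exact Or.inr rfl
        · exact Or.inl (Or.inr ⟨i, by omega, rfl⟩)

theorem exists_take_iff_prefix (x t2 : List Int) :
    (∃ i < t2.length + 1, x = t2.take i) ↔ x <+: t2 := by
  constructor
  · rintro ⟨i, _, rfl⟩; exact List.take_prefix i t2
  · intro hp
    exact ⟨x.length, by have := hp.length_le; omega, ((List.prefix_iff_eq_take).1 hp)⟩

theorem mem_pvPrefixSet (s2 : List (List Int)) (x : List Int) :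
    x ∈ pvPrefixSet s2 ↔ ∃ t2 ∈ s2, x <+: t2 := by
  unfold pvPrefixSet
  suffices h : ∀ (acc : PySem.Set (List Int)),
      x ∈ s2.foldl (fun acc t2 =>
          (List.range (t2.length + 1)).foldl (fun acc i => PySem.Set.add acc (t2.take i)) acc) acc ↔
        x ∈ acc ∨ ∃ t2 ∈ s2, x <+: t2 by
    rw [h]; simp [PySem.Set.empty]
  induction s2 with
  | nil => simp
  | cons t2 rest ih =>
    intro acc
    simp only [List.foldl_cons, ih, mem_range_foldl, exists_take_iff_prefix]
    constructor
    · rintro (( h | h) | ⟨u, hu, hp⟩)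
      · exact Or.inl h
      · exact Or.inr ⟨t2, List.mem_cons_self, h⟩
      · exact Or.inr ⟨u, List.mem_cons_of_mem _ hu, hp⟩
    · rintro (h | ⟨u, hu, hp⟩)
      · exact Or.inl (Or.inl h)
      · rcases List.mem_cons.1 hu with rfl | hu'
        · exact Or.inl (Or.inr hp)
        · exact Or.inr ⟨u, hu', hp⟩

-- ===== VERDICT (by name: the statement is the Claim_ definition above) =====
theorem tuple_subsumption_spec : Claim_equal_tuple_subsumption := by
  intro s1 s2 hd
  clear hd
  unfold Spec_tuple_subsumption
  induction s1 with
  | nil => simp [tuple_subsumption, tuple_subsumption_alt]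
  | cons t1 rest ih =>
    simp only [tuple_subsumption, tuple_subsumption_alt, List.all_cons] at *
    have hmem : PySem.Set.contains (pvPrefixSet s2) t1 = pvInnerA t1 s2 := by
      rw [Bool.eq_iff_iff, PySem.Set.contains_iff, mem_pvPrefixSet, pvInnerA_iff]
    by_cases h : pvInnerA t1 s2 = true
    · rw [hmem, h]; simp [ih]
    · simp only [Bool.not_eq_true] at h
      rw [hmem, h]; simp
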